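-- pv_equiv track=rewrite | github.com/iercetin/projecteuler | codewars/snail_1.py | generate_clock
-- ===== SOURCE A (Python) =====
-- def generate_clock(n):
--     gn = []
--     for i in range(n):
--         a = []
--         for j in range(n):
--             a.append((n*i) + j)
--         gn.append(a)
--     return gn
-- ===== SOURCE B (Python) =====
-- def generate_clock(n):
--     if n <= 0:
--         return []
--     flat = list(range(n * n))
--     return [flat[i * n:(i + 1) * n] for i in range(n)]
-- ===== Notes on version B (the rewrite author's own statement) =====
-- stated objective: simpler
-- what changed: B builds the whole flattened grid once with a single range(n*n) and reshapes it into rows by slicing, instead of A's nested cell-by-cell append loops.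
import Mathlib
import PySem

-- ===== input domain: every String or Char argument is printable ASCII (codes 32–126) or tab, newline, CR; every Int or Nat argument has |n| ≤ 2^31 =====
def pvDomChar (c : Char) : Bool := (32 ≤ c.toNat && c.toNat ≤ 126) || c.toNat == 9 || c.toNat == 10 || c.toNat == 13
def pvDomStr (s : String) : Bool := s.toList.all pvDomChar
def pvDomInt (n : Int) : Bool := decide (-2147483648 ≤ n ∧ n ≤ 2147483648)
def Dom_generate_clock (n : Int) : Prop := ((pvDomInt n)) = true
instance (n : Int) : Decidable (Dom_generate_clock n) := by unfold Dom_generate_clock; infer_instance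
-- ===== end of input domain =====

-- B builds the flattened grid once (range(n*n)) and reshapes it by slicing; simpler than A's nested append loops.

-- ===== PORT A =====
def generate_clock (n : Int) : List (List Int) :=
  (PySem.List.pyRange 0 n 1).foldl
    (fun gn i =>
      gn ++ [(PySem.List.pyRange 0 n 1).foldl (fun a j => a ++ [n * i + j]) []])
    []

-- ===== PORT B =====
def generate_clock_alt (n : Int) : List (List Int) :=
  if n ≤ 0 then []
  else
    let flat := PySem.List.pyRange 0 (n * n) 1
    (PySem.List.pyRange 0 n 1).map
      (fun i => PySem.List.slice flat (some (i * n)) (some ((i + 1) * n)))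

-- ===== PRECONDITION & SPEC =====
def Spec_generate_clock (n : Int) (out : List (List Int)) : Prop := out = generate_clock_alt n
instance (n : Int) (out : List (List Int)) : Decidable (Spec_generate_clock n out) := by unfold Spec_generate_clock; infer_instance

-- ===== CLAIM (what is proved, stated in full; the proofs are below) =====
def Claim_equal_generate_clock : Prop := ∀ (n : Int), Dom_generate_clock n → Spec_generate_clock n (generate_clock n)

-- ===== LEMMAS AND PROOFS =====

theorem foldl_append_map {α β : Type} (f : α → β) :
    ∀ (l : List α) (init : List β),
      l.foldl (fun acc x => acc ++ [f x]) init = init ++ l.map f := by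
  intro l
  induction l with
  | nil => simp
  | cons x xs ih => intro init; simp [List.foldl, ih]

theorem slice_pyRange (a b c : Int) (ha : 0 ≤ a) (hab : a ≤ b) (hbc : b ≤ c) :
    PySem.List.slice (PySem.List.pyRange 0 c 1) (some a) (some b) =
      PySem.List.pyRange a b 1 := by
  rw [PySem.List.slice_toNat _ ha (le_trans ha hab)]
  apply List.ext_getElem
  · simp [PySem.List.length_pyRange_one]; omega
  · intro k h1 h2
    simp only [List.getElem_take, List.getElem_drop]
    rw [PySem.List.getElem_pyRange_one, PySem.List.getElem_pyRange_one]
    omega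

theorem map_add_pyRange (a m : Int) :
    (PySem.List.pyRange 0 m 1).map (fun j => a + j) = PySem.List.pyRange a (a + m) 1 := by
  rw [PySem.List.pyRange_one, PySem.List.pyRange_one, List.map_map]
  simp

-- ===== VERDICT (by name: the statement is the Claim_ definition above) =====
theorem generate_clock_spec : Claim_equal_generate_clock := by
  intro n _
  show generate_clock n = generate_clock_alt n
  unfold generate_clock generate_clock_alt
  by_cases hle : n ≤ 0
  · simp [hle, PySem.List.pyRange_one_eq_nil hle]
  simp only [hle, if_false]
  rw [foldl_append_map, List.nil_append]
  apply List.map_congr_left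
  intro i hi
  rw [PySem.List.mem_pyRange_one] at hi
  rw [foldl_append_map, List.nil_append, map_add_pyRange]
  have hn : 0 < n := lt_of_le_of_lt hi.1 hi.2
  rw [slice_pyRange (i * n) ((i + 1) * n) (n * n)
      (mul_nonneg hi.1 (le_of_lt hn))
      (by nlinarith)
      (by nlinarith)]
  have h1 : i * n = n * i := by ring
  have h2 : (i + 1) * n = n * i + n := by ring
  rw [h1, h2]
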